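-- pv_equiv track=rewrite | github.com/ej0cl6/TextEE | TextEE/models/AMRIE/transform_for_amrie.py | tokens_to_offset_list
-- ===== SOURCE A (Python) =====
-- def tokens_to_offset_list(tokens_list):
--     tokens_num = len(tokens_list)
--     curr_len = 0
--     offsets_list = []
--
--     for i in range(tokens_num):
--         start = curr_len
--         end = curr_len + len(tokens_list[i])
--         curr_len = end + 1
--
--         offsets_list.append((start, end))
--
--     return offsets_list
-- ===== SOURCE B (Python) =====
-- def tokens_to_offset_list(tokens_list):
--     lens = [len(t) for t in tokens_list]
--     starts = [0]
--     for l in lens[:-1]: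
--         starts.append(starts[-1] + l + 1)
--     return [(s, s + l) for s, l in zip(starts, lens)]
-- ===== Notes on version B (the rewrite author's own statement) =====
-- stated objective: alternative
-- what changed: Replaces the single accumulator loop that emits (start,end) pairs while carrying a running offset by a three-phase pipeline: a lengths table, a separately built prefix-start table (starts[-1]+len+1), and a zip comprehension pairing each start with start+len.
import Mathlib
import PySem

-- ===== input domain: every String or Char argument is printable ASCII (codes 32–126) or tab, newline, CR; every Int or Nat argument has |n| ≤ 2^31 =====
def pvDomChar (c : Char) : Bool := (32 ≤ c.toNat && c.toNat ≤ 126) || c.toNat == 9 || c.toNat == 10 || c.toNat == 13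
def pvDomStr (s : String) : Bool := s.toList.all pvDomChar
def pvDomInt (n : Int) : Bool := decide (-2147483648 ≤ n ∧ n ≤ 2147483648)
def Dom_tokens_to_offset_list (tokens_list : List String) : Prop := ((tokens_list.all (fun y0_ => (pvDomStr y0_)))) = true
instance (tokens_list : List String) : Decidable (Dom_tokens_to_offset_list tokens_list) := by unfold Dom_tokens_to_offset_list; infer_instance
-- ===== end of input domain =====

-- B rebuilds the same offsets via a lengths table, a separate prefix-start table and a zip pass (objective: alternative decomposition).

-- ===== PORT A =====
-- the index i ranges over range(len(tokens_list)), so tokens_list[i] is always in range: pyGetD is exact here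
def tokens_to_offset_list (tokens_list : List String) : List (Int × Int) :=
  let tokens_num := tokens_list.length
  let st := (PySem.List.pyRange 0 tokens_num 1).foldl
    (fun (st : Int × List (Int × Int)) i =>
      let start := st.1
      let «end» := st.1 + PySem.Str.len (PySem.List.pyGetD tokens_list i "")
      («end» + 1, st.2 ++ [(start, «end»)]))
    (0, [])
  st.2

-- ===== PORT B =====
-- starts is nonempty throughout the loop (seeded with [0]), so starts[-1] never raises: pyGetD is exact here
def tokens_to_offset_list_alt (tokens_list : List String) : List (Int × Int) :=
  let lens := tokens_list.map (fun t => PySem.Str.len t)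
  let starts := (PySem.List.slice lens none (some (-1))).foldl
    (fun (st : List Int) l => st ++ [PySem.List.pyGetD st (-1) 0 + l + 1]) [(0 : Int)]
  (starts.zip lens).map (fun p => (p.1, p.1 + p.2))

-- ===== PRECONDITION & SPEC =====
def Spec_tokens_to_offset_list (tokens_list : List String) (out : List (Int × Int)) : Prop := out = tokens_to_offset_list_alt tokens_list
instance (tokens_list : List String) (out : List (Int × Int)) : Decidable (Spec_tokens_to_offset_list tokens_list out) := by unfold Spec_tokens_to_offset_list; infer_instance

-- ===== CLAIM (what is proved, stated in full; the proofs are below) =====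
def Claim_equal_tokens_to_offset_list : Prop := ∀ (tokens_list : List String), Dom_tokens_to_offset_list tokens_list → Spec_tokens_to_offset_list tokens_list (tokens_to_offset_list tokens_list)

-- ===== LEMMAS AND PROOFS =====

-- common reference shape: the offset pairs for a list of token lengths starting at offset c
def pvOffs (c : Int) : List Int → List (Int × Int)
  | [] => []
  | l :: L => (c, c + l) :: pvOffs (c + l + 1) L

-- tails of the prefix-start table built by B's loop
def pvTails (s : Int) : List Int → List Int
  | [] => []
  | l :: L => (s + l + 1) :: pvTails (s + l + 1) L

-- A's fold over range(len(pre ++ tl)) restricted to the indices of tl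
theorem pvFoldA (tl : List String) : ∀ (pre : List String) (c : Int) (acc : List (Int × Int)),
    ((PySem.List.pyRange (pre.length : Int) ((pre.length : Int) + (tl.length : Int)) 1).foldl
      (fun (st : Int × List (Int × Int)) i =>
        (st.1 + PySem.Str.len (PySem.List.pyGetD (pre ++ tl) i "") + 1,
         st.2 ++ [(st.1, st.1 + PySem.Str.len (PySem.List.pyGetD (pre ++ tl) i ""))]))
      (c, acc)).2 = acc ++ pvOffs c (tl.map (fun t => PySem.Str.len t)) := by
  induction tl with
  | nil =>
    intro pre c acc
    simp [PySem.List.pyRange_one_eq_nil, pvOffs]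
  | cons t rest ih =>
    intro pre c acc
    rw [PySem.List.pyRange_one_cons (by simp only [List.length_cons]; push_cast; omega)]
    rw [List.foldl_cons]
    have hget : PySem.List.pyGetD (pre ++ t :: rest) (pre.length : Int) "" = t := by
      simp [PySem.List.pyGetD_natCast, List.getD_eq_getElem?_getD]
    rw [hget]
    have hlen : ((pre.length : Int) + 1) = (((pre ++ [t]).length : Int)) := by
      simp
    have hbound : ((pre.length : Int) + ((t :: rest).length : Int))
        = ((pre ++ [t]).length : Int) + (rest.length : Int) := by
      simp; omega
    have hlist : pre ++ t :: rest = (pre ++ [t]) ++ rest := by simp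
    rw [hlen, hbound, hlist]
    rw [ih (pre ++ [t]) (c + PySem.Str.len t + 1) (acc ++ [(c, c + PySem.Str.len t)])]
    simp [pvOffs]

-- B's loop: appending to a nonempty starts table, reading its last element
theorem pvFoldB (L : List Int) : ∀ (pre : List Int) (s : Int),
    L.foldl (fun (st : List Int) l => st ++ [PySem.List.pyGetD st (-1) 0 + l + 1]) (pre ++ [s])
      = pre ++ [s] ++ pvTails s L := by
  induction L with
  | nil => intro pre s; simp [pvTails]
  | cons l rest ih =>
    intro pre s
    rw [List.foldl_cons, PySem.List.pyGetD_neg_one_append_singleton]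
    have h : pre ++ [s] ++ [s + l + 1] = (pre ++ [s]) ++ [s + l + 1] := rfl
    rw [h, ih (pre ++ [s]) (s + l + 1)]
    simp [pvTails]

-- the zip of the start table with the lengths is exactly pvOffs
theorem pvZip (L : List Int) : ∀ (c : Int),
    ((c :: pvTails c L.dropLast).zip L).map (fun p => (p.1, p.1 + p.2)) = pvOffs c L := by
  induction L with
  | nil => intro c; simp [pvOffs]
  | cons l rest ih =>
    intro c
    cases rest with
    | nil => simp [pvTails, pvOffs]
    | cons r rs =>
      have hd : (l :: r :: rs).dropLast = l :: (r :: rs).dropLast := rfl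
      have h1 : pvTails c (l :: (r :: rs).dropLast) = (c + l + 1) :: pvTails (c + l + 1) (r :: rs).dropLast := rfl
      have h2 : pvOffs c (l :: r :: rs) = (c, c + l) :: pvOffs (c + l + 1) (r :: rs) := rfl
      rw [hd, h1, h2, ← ih (c + l + 1), List.zip_cons_cons, List.map_cons]

theorem pvA_eq (tokens_list : List String) :
    tokens_to_offset_list tokens_list = pvOffs 0 (tokens_list.map (fun t => PySem.Str.len t)) := by
  have h := pvFoldA tokens_list [] 0 []
  simpa [tokens_to_offset_list] using h

theorem pvB_eq (tokens_list : List String) :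
    tokens_to_offset_list_alt tokens_list = pvOffs 0 (tokens_list.map (fun t => PySem.Str.len t)) := by
  have e : tokens_to_offset_list_alt tokens_list =
      (((PySem.List.slice (tokens_list.map (fun t => PySem.Str.len t)) none (some (-1))).foldl
        (fun (st : List Int) l => st ++ [PySem.List.pyGetD st (-1) 0 + l + 1]) [(0 : Int)]).zip
        (tokens_list.map (fun t => PySem.Str.len t))).map (fun p => (p.1, p.1 + p.2)) := rfl
  rw [e, PySem.List.slice_to_neg_one]
  have h := pvFoldB (tokens_list.map (fun t => PySem.Str.len t)).dropLast [] 0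
  simp only [List.nil_append] at h
  rw [h]
  simpa using pvZip (tokens_list.map (fun t => PySem.Str.len t)) 0

-- ===== VERDICT (by name: the statement is the Claim_ definition above) =====
theorem tokens_to_offset_list_spec : Claim_equal_tokens_to_offset_list := by
  intro tokens_list _
  unfold Spec_tokens_to_offset_list
  rw [pvA_eq, pvB_eq]
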